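-- pv_equiv track=rewrite | github.com/besser82/libxcrypt | test/ka-table-gen.py | buggy_expand_BF_key
-- ===== SOURCE A (Python) =====
-- BF_KEY_LEN  = 18
--
-- def buggy_expand_BF_key(phrase):
--     p = 0
--     lp = len(phrase)
--     expanded = [0]*BF_KEY_LEN
--     if lp > 0:
--         for i in range(BF_KEY_LEN):
--             tmp = 0
--             for j in range(4):
--                 if p == lp:
--                     c = 0
--                 else:
--                     c = phrase[p]
--                 stmp = ((c & 0x7F) - (c & 0x80)) & 0xFFFFFFFF
--                 tmp = ((tmp << 8) | stmp) & 0xFFFFFFFF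
--                 p += 1
--                 if p == lp + 1:
--                     p = 0
--             expanded[i] = tmp
--     return expanded
-- ===== SOURCE B (Python) =====
-- BF_KEY_LEN = 18
--
-- def buggy_expand_BF_key(phrase):
--     lp = len(phrase)
--     if lp == 0:
--         return [0] * BF_KEY_LEN
--     # pass 1: the 72 signed-byte values of the virtual stream of period lp+1
--     stream = []
--     for k in range(4 * BF_KEY_LEN):
--         idx = k % (lp + 1)
--         c = 0 if idx == lp else phrase[idx]
--         stream.append(((c & 0x7F) - (c & 0x80)) & 0xFFFFFFFF)
--     # pass 2: fold each group of 4 bytes into a 32-bit word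
--     words = []
--     for g in range(BF_KEY_LEN):
--         w = 0
--         for j in range(4):
--             w = ((w << 8) | stream[4 * g + j]) & 0xFFFFFFFF
--         words.append(w)
--     return words
-- ===== Notes on version B (the rewrite author's own statement) =====
-- stated objective: simpler
-- what changed: Replaces A's single stateful pointer p threaded through a nested double loop (with an in-loop reset check and in-place writes into a preallocated list) by two independent passes: first build the 72-byte periodic stream by direct indexing k % (lp+1), then fold each 4-byte chunk into a 32-bit word.
import Mathlib
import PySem

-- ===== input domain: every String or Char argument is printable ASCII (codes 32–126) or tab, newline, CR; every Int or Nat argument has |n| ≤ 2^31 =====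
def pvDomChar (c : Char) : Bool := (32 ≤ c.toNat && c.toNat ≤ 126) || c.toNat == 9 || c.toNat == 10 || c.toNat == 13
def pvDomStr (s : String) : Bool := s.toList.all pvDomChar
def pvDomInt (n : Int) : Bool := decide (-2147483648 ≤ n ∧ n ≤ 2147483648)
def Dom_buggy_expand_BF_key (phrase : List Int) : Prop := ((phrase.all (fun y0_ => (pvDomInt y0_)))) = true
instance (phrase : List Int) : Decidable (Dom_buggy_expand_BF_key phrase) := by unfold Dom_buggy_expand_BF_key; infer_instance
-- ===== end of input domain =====

-- B replaces A's single stateful pointer-chasing double loop by two independent passes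
-- (build the 72-byte periodic stream by indexing k % (lp+1), then fold 4-byte chunks into words):
-- objective 'simpler', same cost.

-- ===== PORT A =====
-- the body of A's inner 'for j in range(4)' loop: state (tmp, p)
def pvAInner (phrase : List Int) (st : Int × Int) (_ : Nat) : Int × Int :=
  let lp : Int := phrase.length
  let c : Int := if st.2 = lp then 0 else (PySem.List.pyGet? phrase st.2).getD 0
  let stmp := PySem.Int.band (PySem.Int.band c 0x7F - PySem.Int.band c 0x80) 0xFFFFFFFF
  (PySem.Int.band (PySem.Int.bor (st.1 <<< 8) stmp) 0xFFFFFFFF,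
   if st.2 + 1 = lp + 1 then 0 else st.2 + 1)

-- the body of A's outer 'for i in range(BF_KEY_LEN)' loop: state (p, expanded)
def pvAOuter (phrase : List Int) (st : Int × List Int) (i : Nat) : Int × List Int :=
  let r := (List.range 4).foldl (pvAInner phrase) (0, st.1)
  (r.2, st.2.set i r.1)

def buggy_expand_BF_key (phrase : List Int) : List Int :=
  let lp : Int := phrase.length
  let expanded : List Int := List.replicate 18 0
  if lp > 0 then
    ((List.range 18).foldl (pvAOuter phrase) (0, expanded)).2
  else expanded

-- ===== PORT B =====
def buggy_expand_BF_key_alt (phrase : List Int) : List Int :=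
  let lp : Int := phrase.length
  if lp = 0 then List.replicate 18 0
  else
    -- pass 1: the 72 signed-byte values of the virtual stream of period lp+1
    let stream : List Int := (List.range 72).map (fun (k : Nat) =>
      let idx := PySem.Int.mod ((k : Nat) : Int) (lp + 1)
      let c : Int := if idx = lp then 0 else (PySem.List.pyGet? phrase idx).getD 0
      PySem.Int.band (PySem.Int.band c 0x7F - PySem.Int.band c 0x80) 0xFFFFFFFF)
    -- pass 2: fold each group of 4 bytes into a 32-bit word
    (List.range 18).map (fun g =>
      (List.range 4).foldl (fun w j =>
        PySem.Int.band (PySem.Int.bor (w <<< 8)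
          ((PySem.List.pyGet? stream ((4 * g + j : Nat) : Int)).getD 0)) 0xFFFFFFFF) 0)

-- ===== PRECONDITION & SPEC =====
def Spec_buggy_expand_BF_key (phrase : List Int) (out : List Int) : Prop := out = buggy_expand_BF_key_alt phrase
instance (phrase : List Int) (out : List Int) : Decidable (Spec_buggy_expand_BF_key phrase out) := by unfold Spec_buggy_expand_BF_key; infer_instance

-- ===== CLAIM (what is proved, stated in full; the proofs are below) =====
def Claim_equal_buggy_expand_BF_key : Prop := ∀ (phrase : List Int), Dom_buggy_expand_BF_key phrase → Spec_buggy_expand_BF_key phrase (buggy_expand_BF_key phrase)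

-- ===== LEMMAS AND PROOFS =====

-- the signed-byte value of the stream at (in-range) position r
def pvSB (phrase : List Int) (r : Int) : Int :=
  let lp : Int := phrase.length
  let c : Int := if r = lp then 0 else (PySem.List.pyGet? phrase r).getD 0
  PySem.Int.band (PySem.Int.band c 0x7F - PySem.Int.band c 0x80) 0xFFFFFFFF

def pvCombine (w b : Int) : Int := PySem.Int.band (PySem.Int.bor (w <<< 8) b) 0xFFFFFFFF

-- the word produced from absolute stream positions q, q+1, q+2, q+3
def pvWord (phrase : List Int) (q : Int) : Int :=
  let L : Int := (phrase.length : Int) + 1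
  pvCombine (pvCombine (pvCombine (pvCombine 0 (pvSB phrase (q % L)))
    (pvSB phrase ((q + 1) % L))) (pvSB phrase ((q + 2) % L))) (pvSB phrase ((q + 3) % L))

theorem pv_step_mod (L q : Int) (hL : 1 < L) :
    (if q % L + 1 = L then (0 : Int) else q % L + 1) = (q + 1) % L := by
  have h0 : 0 ≤ q % L := Int.emod_nonneg q (by omega)
  have h1 : q % L < L := Int.emod_lt_of_pos q (by omega)
  have h2 : (q + 1) % L = (q % L + 1) % L := by
    rw [Int.add_emod q 1 L, Int.emod_eq_of_lt (by omega) hL]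
  by_cases h : q % L + 1 = L
  · simp [h, h2]
  · rw [if_neg h, h2]
    exact (Int.emod_eq_of_lt (by omega) (by omega)).symm

theorem pv_inner_step (phrase : List Int) (w q : Int)
    (hL : 1 < (phrase.length : Int) + 1) (j : Nat) :
    pvAInner phrase (w, q % ((phrase.length : Int) + 1)) j
      = (pvCombine w (pvSB phrase (q % ((phrase.length : Int) + 1))),
         (q + 1) % ((phrase.length : Int) + 1)) := by
  unfold pvAInner pvCombine pvSB
  simp only []
  rw [pv_step_mod _ q hL]

theorem pv_inner_eq (phrase : List Int) (q : Int)
    (hL : 1 < (phrase.length : Int) + 1) :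
    (List.range 4).foldl (pvAInner phrase) (0, q % ((phrase.length : Int) + 1))
      = (pvWord phrase q, (q + 4) % ((phrase.length : Int) + 1)) := by
  have h4 : List.range 4 = [0, 1, 2, 3] := rfl
  rw [h4]
  simp only [List.foldl]
  rw [pv_inner_step phrase _ q hL, pv_inner_step phrase _ (q+1) hL,
      pv_inner_step phrase _ (q+1+1) hL, pv_inner_step phrase _ (q+1+1+1) hL]
  unfold pvWord
  rw [show q+1+1 = q+2 by ring, show q+2+1 = q+3 by ring, show q+3+1 = q+4 by ring]

theorem pv_setfold (w : Nat → Int) :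
    ∀ (n i : Nat) (pre e : List Int), pre.length = i → e.length = n →
    (List.range' i n).foldl (fun l j => l.set j (w j)) (pre ++ e)
      = pre ++ (List.range' i n).map w := by
  intro n
  induction n with
  | zero => intro i pre e _ he; simp [List.length_eq_zero_iff.mp he]
  | succ m ih =>
    intro i pre e hpre he
    cases e with
    | nil => simp at he
    | cons b e' =>
      simp only [List.range'_succ, List.foldl_cons, List.map_cons]
      have hset : (pre ++ b :: e').set i (w i) = (pre ++ [w i]) ++ e' := by
        rw [List.set_append_right _ _ (by omega)]
        simp [hpre]
      rw [hset, ih (i + 1) (pre ++ [w i]) e' (by simp [hpre]) (by simpa using he)]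
      simp

theorem pv_outer_eq (phrase : List Int) (hL : 1 < (phrase.length : Int) + 1) :
    ∀ (n i : Nat) (e : List Int),
    ((List.range' i n).foldl (pvAOuter phrase)
        (((4 * i : Nat) : Int) % ((phrase.length : Int) + 1), e)).2
      = (List.range' i n).foldl (fun l j => l.set j (pvWord phrase (4 * (j : Int)))) e := by
  intro n
  induction n with
  | zero => intro i e; simp
  | succ m ih =>
    intro i e
    simp only [List.range'_succ, List.foldl_cons]
    have hstep : pvAOuter phrase (((4 * i : Nat) : Int) % ((phrase.length : Int) + 1), e) i
        = (((4 * (i + 1) : Nat) : Int) % ((phrase.length : Int) + 1),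
           e.set i (pvWord phrase (4 * (i : Int)))) := by
      unfold pvAOuter
      rw [show ((4 * i : Nat) : Int) = 4 * (i : Int) by push_cast; ring]
      rw [pv_inner_eq phrase (4 * (i : Int)) hL]
      rw [show ((4 * (i + 1) : Nat) : Int) = 4 * (i : Int) + 4 by push_cast; ring]
    rw [hstep, ih (i + 1)]

theorem pv_mod_eq (a b : Int) (hb : 0 < b) : PySem.Int.mod a b = a % b := by
  unfold PySem.Int.mod
  rw [Int.fmod_eq_emod]
  simp [Or.inl hb.le]

theorem pv_stream_get (phrase : List Int) (hL : 0 < phrase.length) (k : Nat) (hk : k < 72) :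
    (PySem.List.pyGet? ((List.range 72).map (fun (k : Nat) =>
        let idx := PySem.Int.mod ((k : Nat) : Int) ((phrase.length : Int) + 1)
        let c : Int := if idx = (phrase.length : Int) then 0 else (PySem.List.pyGet? phrase idx).getD 0
        PySem.Int.band (PySem.Int.band c 0x7F - PySem.Int.band c 0x80) 0xFFFFFFFF))
      ((k : Nat) : Int)).getD 0
      = pvSB phrase ((k : Int) % ((phrase.length : Int) + 1)) := by
  rw [PySem.List.pyGet?_natCast]
  rw [List.getElem?_map]
  simp only [List.getElem?_range hk, Option.map_some, Option.getD_some]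
  rw [pv_mod_eq _ _ (by positivity)]
  rfl

theorem pv_B_word (phrase : List Int) (hL : 0 < phrase.length) (g : Nat) (hg : g < 18) :
    (List.range 4).foldl (fun w j =>
        PySem.Int.band (PySem.Int.bor (w <<< 8)
          ((PySem.List.pyGet? ((List.range 72).map (fun (k : Nat) =>
            let idx := PySem.Int.mod ((k : Nat) : Int) ((phrase.length : Int) + 1)
            let c : Int := if idx = (phrase.length : Int) then 0 else (PySem.List.pyGet? phrase idx).getD 0
            PySem.Int.band (PySem.Int.band c 0x7F - PySem.Int.band c 0x80) 0xFFFFFFFF))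
            ((4 * g + j : Nat) : Int)).getD 0)) 0xFFFFFFFF) 0
      = pvWord phrase (4 * (g : Int)) := by
  have h4 : List.range 4 = [0, 1, 2, 3] := rfl
  rw [h4]
  simp only [List.foldl]
  rw [pv_stream_get phrase hL (4*g+0) (by omega), pv_stream_get phrase hL (4*g+1) (by omega),
      pv_stream_get phrase hL (4*g+2) (by omega), pv_stream_get phrase hL (4*g+3) (by omega)]
  rw [show ((4*g+0 : Nat) : Int) = 4*(g : Int) by push_cast; ring,
      show ((4*g+1 : Nat) : Int) = 4*(g : Int) + 1 by push_cast; ring,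
      show ((4*g+2 : Nat) : Int) = 4*(g : Int) + 2 by push_cast; ring,
      show ((4*g+3 : Nat) : Int) = 4*(g : Int) + 3 by push_cast; ring]
  rfl

theorem pv_A_eq (phrase : List Int) (hlen : 0 < phrase.length) :
    buggy_expand_BF_key phrase
      = (List.range 18).map (fun (g : Nat) => pvWord phrase (4 * ((g : Nat) : Int))) := by
  have hpos : (0 : Int) < (phrase.length : Int) := by exact_mod_cast hlen
  have hL : (1 : Int) < (phrase.length : Int) + 1 := by omega
  simp only [buggy_expand_BF_key]
  rw [if_pos hpos]
  rw [show ((0 : Int), List.replicate 18 (0 : Int))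
        = (((4 * 0 : Nat) : Int) % ((phrase.length : Int) + 1), List.replicate 18 (0 : Int)) by
      norm_num]
  rw [List.range_eq_range', pv_outer_eq phrase hL 18 0]
  have := pv_setfold (fun j => pvWord phrase (4 * (j : Int))) 18 0 [] (List.replicate 18 0) rfl
    (by simp)
  simpa [List.range_eq_range'] using this

theorem pv_B_eq (phrase : List Int) (hlen : 0 < phrase.length) :
    buggy_expand_BF_key_alt phrase
      = (List.range 18).map (fun (g : Nat) => pvWord phrase (4 * ((g : Nat) : Int))) := by
  simp only [buggy_expand_BF_key_alt]
  rw [if_neg (by exact_mod_cast hlen.ne')]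
  apply List.map_congr_left
  intro g hg
  exact pv_B_word phrase hlen g (List.mem_range.mp hg)

theorem buggy_expand_BF_key_spec : Claim_equal_buggy_expand_BF_key := by
  intro phrase _
  unfold Spec_buggy_expand_BF_key
  by_cases h : phrase.length = 0
  · rw [List.length_eq_zero_iff.mp h]
    rfl
  · rw [pv_A_eq phrase (Nat.pos_of_ne_zero h), pv_B_eq phrase (Nat.pos_of_ne_zero h)]
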